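-- pv_equiv track=rewrite | github.com/Roussanto/Delivery-App | gui/func.py | make_basket_str
-- ===== SOURCE A (Python) =====
-- def make_basket_str(basket):
--     basket_str = []
--     for i, item_dict in enumerate(basket):
--         item_str = f"Item {i + 1}: "
--         for j, elem in enumerate(list(item_dict.values())):
--             # The first element is always the offer type
--             if j == 0:
--                 item_str += f"Offer - {elem}"
--             # The second element is always the item category
--             elif j == 1:
--                 item_str += f", Category - {elem}"
--             # The first ingredient string is followed by ':' and a space
--             elif j == 2:
--                 item_str += f": {elem}"
--             # If an element does not exist, practically skip the appending
--             elif elem == "":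
--                 item_str += ""
--             # If an element exists append it with a comma and a white space
--             else:
--                 item_str += f", {elem}"
--         # Fill the string basket with the new string item
--         basket_str.append(item_str)
--     return basket_str
-- ===== SOURCE B (Python) =====
-- _LABELS = ("Offer - ", ", Category - ", ": ")
--
--
-- def _item_str(i, item_dict):
--     vals = list(item_dict.values())
--     head = "".join(label + v for label, v in zip(_LABELS, vals))
--     tail = "".join(", " + v for v in vals[3:] if v != "")
--     return f"Item {i + 1}: " + head + tail
--
--
-- def make_basket_str(basket):
--     return [_item_str(i, item_dict) for i, item_dict in enumerate(basket)]
-- ===== Notes on version B (the rewrite author's own statement) =====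
-- stated objective: simpler
-- what changed: Replaces A's single index-branching accumulator loop (j==0/1/2/empty/else tested on every element, += into a growing string) with a declarative table-driven build: zip the first values against a fixed label table and join, then join a comma-prefixed filter of the remaining values, assembling each item string in one expression inside a list comprehension.
import Mathlib
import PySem

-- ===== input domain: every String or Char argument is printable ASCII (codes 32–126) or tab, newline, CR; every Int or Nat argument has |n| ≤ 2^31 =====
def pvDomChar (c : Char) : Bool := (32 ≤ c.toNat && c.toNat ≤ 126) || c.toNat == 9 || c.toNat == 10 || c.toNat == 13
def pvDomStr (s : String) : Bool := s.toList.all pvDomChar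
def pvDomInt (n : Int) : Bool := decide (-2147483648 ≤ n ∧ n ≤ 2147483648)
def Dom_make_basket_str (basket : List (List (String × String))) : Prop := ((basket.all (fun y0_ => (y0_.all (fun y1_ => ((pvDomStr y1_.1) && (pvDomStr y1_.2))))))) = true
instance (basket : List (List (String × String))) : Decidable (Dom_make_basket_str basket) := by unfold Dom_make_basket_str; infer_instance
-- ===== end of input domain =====

-- B replaces A's index-branching accumulator loop with a table-driven build: zip the values
-- against a fixed label table and join, then join a comma-prefixed filter of the tail (simpler).

-- ===== PORT A =====
-- inner loop of A: 'for j, elem in enumerate(list(item_dict.values())): …'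
def pvA_inner (j : Nat) (s : String) : List String → String
  | [] => s
  | e :: rest =>
      pvA_inner (j + 1)
        (if j = 0 then s ++ ("Offer - " ++ e)
         else if j = 1 then s ++ (", Category - " ++ e)
         else if j = 2 then s ++ (": " ++ e)
         else if e = "" then s ++ ""
         else s ++ (", " ++ e)) rest

def make_basket_str (basket : List (List (String × String))) : List String :=
  (PySem.List.enumerate basket).foldl
    (fun basket_str p =>
      basket_str ++ [pvA_inner 0 ("Item " ++ PySem.Int.toStr (p.1 + 1) ++ ": ") (PySem.Dict.ofList p.2).values])
    []

-- ===== PORT B =====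
-- the fixed label table _LABELS of Source B
def pvLabels : List String := ["Offer - ", ", Category - ", ": "]

-- '"".join(pieces)' of Source B
def pvJoin (l : List String) : String := l.foldr (· ++ ·) ""

-- per-item helper of B: zip-with-labels head joined, then a filtered comma-joined tail
def pvB_item (i : Int) (d : List (String × String)) : String :=
  let vals := (PySem.Dict.ofList d).values
  let head := pvJoin ((pvLabels.zip vals).map (fun p => p.1 ++ p.2))
  let tail := pvJoin (((vals.drop 3).filter (fun v => v ≠ "")).map (fun v => ", " ++ v))
  ("Item " ++ PySem.Int.toStr (i + 1) ++ ": ") ++ head ++ tail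

def make_basket_str_alt (basket : List (List (String × String))) : List String :=
  (PySem.List.enumerate basket).map (fun p => pvB_item p.1 p.2)

-- ===== PRECONDITION & SPEC =====
def Spec_make_basket_str (basket : List (List (String × String))) (out : List String) : Prop := out = make_basket_str_alt basket
instance (basket : List (List (String × String))) (out : List String) : Decidable (Spec_make_basket_str basket out) := by unfold Spec_make_basket_str; infer_instance

-- ===== CLAIM (what is proved, stated in full; the proofs are below) =====
def Claim_equal_make_basket_str : Prop := ∀ (basket : List (List (String × String))), Dom_make_basket_str basket → Spec_make_basket_str basket (make_basket_str basket)

-- ===== LEMMAS AND PROOFS =====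

-- A's inner loop, once past index 2, equals B's filtered comma-joined tail
theorem pvA_inner_tail (rest : List String) : ∀ (j : Nat) (s : String),
    pvA_inner (j + 3) s rest = s ++ pvJoin ((rest.filter (fun v => v ≠ "")).map (fun v => ", " ++ v)) := by
  induction rest with
  | nil => intro j s; simp [pvA_inner, pvJoin]
  | cons e rest ih =>
      intro j s
      simp only [pvA_inner]
      have h0 : ¬(j + 3 = 0) := by omega
      have h1 : ¬(j + 3 = 1) := by omega
      have h2 : ¬(j + 3 = 2) := by omega
      have hstep : j + 3 + 1 = (j + 1) + 3 := by omega
      rw [if_neg h0, if_neg h1, if_neg h2, hstep]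
      by_cases he : e = ""
      · rw [if_pos he, ih]
        simp [he, pvJoin]
      · rw [if_neg he, ih]
        simp [he, pvJoin, String.append_assoc]

-- A's inner loop from index 0 equals B's table-driven item builder
theorem pvA_inner_eq_item (i : Int) (d : List (String × String)) :
    pvA_inner 0 ("Item " ++ PySem.Int.toStr (i + 1) ++ ": ") (PySem.Dict.ofList d).values = pvB_item i d := by
  unfold pvB_item
  generalize (PySem.Dict.ofList d).values = vals
  generalize "Item " ++ PySem.Int.toStr (i + 1) ++ ": " = s
  match vals with
  | [] => simp [pvA_inner, pvLabels, pvJoin]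
  | [a] => simp [pvA_inner, pvLabels, pvJoin]
  | [a, b] => simp [pvA_inner, pvLabels, pvJoin, String.append_assoc]
  | a :: b :: c :: rest =>
      show pvA_inner 3 _ rest = _
      rw [show (3 : Nat) = 0 + 3 from rfl, pvA_inner_tail rest 0]
      simp [pvLabels, pvJoin, String.append_assoc]

-- ===== VERDICT (by name: the statement is the Claim_ definition above) =====
theorem make_basket_str_spec : Claim_equal_make_basket_str := by
  intro basket _
  unfold Spec_make_basket_str make_basket_str make_basket_str_alt
  rw [PySem.List.foldl_append_singleton_eq_map]
  simp only [List.nil_append]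
  exact List.map_congr_left (fun p _ => pvA_inner_eq_item p.1 p.2)
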